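-- pv_equiv track=rewrite | github.com/Hoplon-AI/Platform-dev | backend/workers/fra_processor.py | _normalise_hazard_type
-- ===== SOURCE A (Python) =====
-- from typing import Any, Optional
--
-- def _to_str(value: Any) -> Optional[str]:
--     if value is None:
--         return None
--     s = str(value).strip()
--     if s.lower() in ("null", "none", "n/a", "unknown", "tbc", "tbd",
--                      "not stated", "not applicable", "not available",
--                      "not provided", "not assessed", ""):
--         return None
--     return s
--
-- def _normalise_hazard_type(raw: Any) -> str:
--     VALID = ("Housekeeping", "Means of Escape", "Fire Spread", "Detection",
--              "Signage", "Emergency Plans", "Fire Service Facilities", "Structural", "Other")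
--     s = _to_str(raw)
--     if not s:
--         return "Other"
--     if s in VALID:
--         return s
--     sl = s.lower()
--     if any(k in sl for k in ("housekeep", "storage", "waste", "rubbish", "clutter")):
--         return "Housekeeping"
--     if any(k in sl for k in ("escape", "exit", "egress", "corridor", "stair")):
--         return "Means of Escape"
--     if any(k in sl for k in ("spread", "compartment", "cladding", "stopping", "intumescent")):
--         return "Fire Spread"
--     if any(k in sl for k in ("detect", "alarm", "smoke", "heat", "aov")):
--         return "Detection"
--     if any(k in sl for k in ("sign", "notice", "label", "marking")):
--         return "Signage"
--     if any(k in sl for k in ("plan", "procedure", "drill", "assembly")):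
--         return "Emergency Plans"
--     if any(k in sl for k in ("brigade", "riser", "hydrant", "hose", "extinguish", "firefight")):
--         return "Fire Service Facilities"
--     if any(k in sl for k in ("structural", "construction", "building fabric")):
--         return "Structural"
--     return "Other"
-- ===== SOURCE B (Python) =====
-- from typing import Any, Optional
--
-- def _to_str(value: Any) -> Optional[str]:
--     if value is None:
--         return None
--     s = str(value).strip()
--     if s.lower() in ("null", "none", "n/a", "unknown", "tbc", "tbd",
--                      "not stated", "not applicable", "not available",
--                      "not provided", "not assessed", ""):
--         return None
--     return s
--
-- VALID = ("Housekeeping", "Means of Escape", "Fire Spread", "Detection",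
--          "Signage", "Emergency Plans", "Fire Service Facilities", "Structural", "Other")
--
-- CATS = ("Housekeeping", "Means of Escape", "Fire Spread", "Detection",
--         "Signage", "Emergency Plans", "Fire Service Facilities", "Structural")
--
-- # flat keyword -> category-priority map (priority = index into CATS);
-- # keywords are pairwise distinct across categories, so the minimum priority
-- # among ALL matching keywords is exactly the first matching group of A.
-- KEYWORD_PRIORITY = {
--     "housekeep": 0, "storage": 0, "waste": 0, "rubbish": 0, "clutter": 0,
--     "escape": 1, "exit": 1, "egress": 1, "corridor": 1, "stair": 1,
--     "spread": 2, "compartment": 2, "cladding": 2, "stopping": 2, "intumescent": 2,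
--     "detect": 3, "alarm": 3, "smoke": 3, "heat": 3, "aov": 3,
--     "sign": 4, "notice": 4, "label": 4, "marking": 4,
--     "plan": 5, "procedure": 5, "drill": 5, "assembly": 5,
--     "brigade": 6, "riser": 6, "hydrant": 6, "hose": 6, "extinguish": 6, "firefight": 6,
--     "structural": 7, "construction": 7, "building fabric": 7,
-- }
--
-- def _normalise_hazard_type(raw: Any) -> str:
--     s = _to_str(raw)
--     if not s:
--         return "Other"
--     if s in VALID:
--         return s
--     sl = s.lower()
--     best = min((p for k, p in KEYWORD_PRIORITY.items() if k in sl), default=None)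
--     return "Other" if best is None else CATS[best]
-- ===== Notes on version B (the rewrite author's own statement) =====
-- stated objective: alternative
-- what changed: A short-circuits through nine ordered keyword groups returning at the first matching group; B instead flattens all keywords into one keyword-to-priority map, computes the MINIMUM priority over every matching keyword in a single comprehension, and indexes the category table with it (correct because the keyword sets are pairwise disjoint, so the minimal matching priority equals A's first matching group).
import Mathlib
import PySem

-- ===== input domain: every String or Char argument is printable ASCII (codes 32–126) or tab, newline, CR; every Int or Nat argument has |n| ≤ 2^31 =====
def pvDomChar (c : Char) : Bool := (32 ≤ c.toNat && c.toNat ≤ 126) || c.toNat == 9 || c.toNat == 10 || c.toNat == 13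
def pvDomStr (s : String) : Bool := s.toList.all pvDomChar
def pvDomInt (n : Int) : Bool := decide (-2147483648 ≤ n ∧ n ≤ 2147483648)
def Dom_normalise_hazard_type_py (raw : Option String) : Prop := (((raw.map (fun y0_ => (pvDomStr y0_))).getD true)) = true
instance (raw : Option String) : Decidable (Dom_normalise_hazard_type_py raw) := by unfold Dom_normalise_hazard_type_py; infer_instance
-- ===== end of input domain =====

-- B replaces A's ordered first-match group cascade by a flat keyword→priority map whose
-- MINIMUM matching priority selects the category (alternative algorithm, same cost).

-- ===== PORT A =====
-- shared helper: Python _to_str (identical in Source A and Source B)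
def nht_toStr (value : Option String) : Option String :=
  match value with
  | none => none
  | some v =>
    let s := PySem.Str.strip v
    if ["null", "none", "n/a", "unknown", "tbc", "tbd",
        "not stated", "not applicable", "not available",
        "not provided", "not assessed", ""].contains (PySem.Str.lower s) then none
    else some s

def nht_VALID : List String :=
  ["Housekeeping", "Means of Escape", "Fire Spread", "Detection",
   "Signage", "Emergency Plans", "Fire Service Facilities", "Structural", "Other"]

def normalise_hazard_type_py (raw : Option String) : String :=
  match nht_toStr raw with
  | none => "Other"                      -- 'if not s' with s = None
  | some s =>
    if s = "" then "Other"               -- 'if not s' with s falsy string (unreachable after strip, kept literal)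
    else if nht_VALID.contains s then s
    else
      let sl := PySem.Str.lower s
      if ["housekeep", "storage", "waste", "rubbish", "clutter"].any (fun k => PySem.Str.isIn k sl) then "Housekeeping"
      else if ["escape", "exit", "egress", "corridor", "stair"].any (fun k => PySem.Str.isIn k sl) then "Means of Escape"
      else if ["spread", "compartment", "cladding", "stopping", "intumescent"].any (fun k => PySem.Str.isIn k sl) then "Fire Spread"
      else if ["detect", "alarm", "smoke", "heat", "aov"].any (fun k => PySem.Str.isIn k sl) then "Detection"
      else if ["sign", "notice", "label", "marking"].any (fun k => PySem.Str.isIn k sl) then "Signage"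
      else if ["plan", "procedure", "drill", "assembly"].any (fun k => PySem.Str.isIn k sl) then "Emergency Plans"
      else if ["brigade", "riser", "hydrant", "hose", "extinguish", "firefight"].any (fun k => PySem.Str.isIn k sl) then "Fire Service Facilities"
      else if ["structural", "construction", "building fabric"].any (fun k => PySem.Str.isIn k sl) then "Structural"
      else "Other"

-- ===== PORT B =====
def nht_CATS : List String :=
  ["Housekeeping", "Means of Escape", "Fire Spread", "Detection",
   "Signage", "Emergency Plans", "Fire Service Facilities", "Structural"]

-- flat keyword -> priority dict (assoc list in insertion order)
def nht_KEYWORD_PRIORITY : List (String × Nat) :=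
  [("housekeep", 0), ("storage", 0), ("waste", 0), ("rubbish", 0), ("clutter", 0),
   ("escape", 1), ("exit", 1), ("egress", 1), ("corridor", 1), ("stair", 1),
   ("spread", 2), ("compartment", 2), ("cladding", 2), ("stopping", 2), ("intumescent", 2),
   ("detect", 3), ("alarm", 3), ("smoke", 3), ("heat", 3), ("aov", 3),
   ("sign", 4), ("notice", 4), ("label", 4), ("marking", 4),
   ("plan", 5), ("procedure", 5), ("drill", 5), ("assembly", 5),
   ("brigade", 6), ("riser", 6), ("hydrant", 6), ("hose", 6), ("extinguish", 6), ("firefight", 6),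
   ("structural", 7), ("construction", 7), ("building fabric", 7)]

def normalise_hazard_type_py_alt (raw : Option String) : String :=
  match nht_toStr raw with
  | none => "Other"
  | some s =>
    if s = "" then "Other"
    else if nht_VALID.contains s then s
    else
      let sl := PySem.Str.lower s
      -- best = min((p for k, p in KEYWORD_PRIORITY.items() if k in sl), default=None)
      let best := PySem.List.min?
        (nht_KEYWORD_PRIORITY.filterMap (fun kp => if PySem.Str.isIn kp.1 sl then some kp.2 else none))
        (fun x => x)
      match best with
      | none => "Other"
      | some p => nht_CATS.getD p "Other"   -- CATS[best]: p is always in range 0..7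

-- ===== PRECONDITION & SPEC =====
def Spec_normalise_hazard_type_py (raw : Option String) (out : String) : Prop := out = normalise_hazard_type_py_alt raw
instance (raw : Option String) (out : String) : Decidable (Spec_normalise_hazard_type_py raw out) := by unfold Spec_normalise_hazard_type_py; infer_instance

-- ===== CLAIM =====
def Claim_equal_normalise_hazard_type_py : Prop := ∀ (raw : Option String), Dom_normalise_hazard_type_py raw → Spec_normalise_hazard_type_py raw (normalise_hazard_type_py raw)

-- ===== LEMMAS AND PROOFS =====

-- the eight keyword groups of A, in order
def nht_groups : List (List String) :=
  [["housekeep", "storage", "waste", "rubbish", "clutter"],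
   ["escape", "exit", "egress", "corridor", "stair"],
   ["spread", "compartment", "cladding", "stopping", "intumescent"],
   ["detect", "alarm", "smoke", "heat", "aov"],
   ["sign", "notice", "label", "marking"],
   ["plan", "procedure", "drill", "assembly"],
   ["brigade", "riser", "hydrant", "hose", "extinguish", "firefight"],
   ["structural", "construction", "building fabric"]]

-- tag each group with its priority, starting at i
def nht_flat : List (List String) → Nat → List (String × Nat)
  | [], _ => []
  | g :: t, i => g.map (fun k => (k, i)) ++ nht_flat t (i + 1)

theorem nht_flat_eq : nht_flat nht_groups 0 = nht_KEYWORD_PRIORITY := by decide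

-- the B-side computation, abstracted over the group list
def nht_best (gs : List (List String)) (i : Nat) (sl : String) : Option Nat :=
  PySem.List.min?
    ((nht_flat gs i).filterMap (fun kp => if PySem.Str.isIn kp.1 sl then some kp.2 else none))
    (fun x => x)

theorem nht_flat_snd_ge (gs : List (List String)) (i : Nat) :
    ∀ p ∈ nht_flat gs i, i ≤ p.2 := by
  induction gs generalizing i with
  | nil => intro p hp; simp [nht_flat] at hp
  | cons g t ih =>
    intro p hp
    simp only [nht_flat, List.mem_append, List.mem_map] at hp
    rcases hp with ⟨k, _, rfl⟩ | hp
    · exact Nat.le_refl i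
    · exact Nat.le_trans (Nat.le_succ i) (ih (i + 1) p hp)

theorem nht_best_cons (g : List String) (t : List (List String)) (i : Nat) (sl : String) :
    nht_best (g :: t) i sl =
      if g.any (fun k => PySem.Str.isIn k sl) then some i else nht_best t (i + 1) sl := by
  unfold nht_best
  simp only [nht_flat, List.filterMap_append, List.filterMap_map]
  by_cases hg : g.any (fun k => PySem.Str.isIn k sl) = true
  · simp only [hg, if_true]
    -- head filtered part is nonempty and all its elements are i; tail elements are ≥ i + 1
    obtain ⟨k, hk, hkin⟩ := List.any_eq_true.mp hg
    set l₁ := g.filterMap ((fun kp : String × Nat => if PySem.Str.isIn kp.1 sl then some kp.2 else none) ∘ fun k => (k, i)) with hl₁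
    set l₂ := (nht_flat t (i + 1)).filterMap (fun kp => if PySem.Str.isIn kp.1 sl then some kp.2 else none) with hl₂
    have hmem : i ∈ l₁ ++ l₂ := by
      refine List.mem_append_left _ ?_
      rw [hl₁]
      exact List.mem_filterMap.mpr ⟨k, hk, by simp only [Function.comp_apply, hkin, if_true]⟩
    have hlow : ∀ x ∈ l₁ ++ l₂, i ≤ x := by
      intro x hx
      rcases List.mem_append.mp hx with hx | hx
      · rw [hl₁] at hx
        obtain ⟨k', _, hk'⟩ := List.mem_filterMap.mp hx
        simp only [Function.comp] at hk'
        split at hk' <;> simp_all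
      · rw [hl₂] at hx
        obtain ⟨kp, hkp, hkp2⟩ := List.mem_filterMap.mp hx
        have := nht_flat_snd_ge t (i + 1) kp hkp
        split at hkp2 <;> simp_all; omega
    cases hmin : PySem.List.min? (l₁ ++ l₂) (fun x => x) with
    | none =>
      have : l₁ ++ l₂ = [] := (PySem.List.min?_eq_none_iff _ _).mp hmin
      rw [this] at hmem; simp at hmem
    | some m =>
      have hm1 : m ∈ l₁ ++ l₂ := PySem.List.min?_mem hmin
      have hm2 := PySem.List.min?_isMin hmin i hmem
      have hm3 := hlow m hm1
      exact congrArg some (Nat.le_antisymm hm2 hm3)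
  · rw [if_neg hg]
    have : g.filterMap ((fun kp : String × Nat => if PySem.Str.isIn kp.1 sl then some kp.2 else none) ∘ fun k => (k, i)) = [] := by
      rw [List.filterMap_eq_nil_iff]
      intro k hk
      have := List.any_eq_false.mp (Bool.not_eq_true _ ▸ hg) k hk
      simp only [Function.comp_apply, if_neg this]
    rw [this, List.nil_append]

-- ===== VERDICT =====
set_option maxHeartbeats 2000000 in
theorem normalise_hazard_type_py_spec : Claim_equal_normalise_hazard_type_py := by
  intro raw _
  unfold Spec_normalise_hazard_type_py normalise_hazard_type_py normalise_hazard_type_py_alt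
  cases h : nht_toStr raw with
  | none => rfl
  | some s =>
    by_cases h0 : s = ""
    · simp [h0]
    · simp only [h0, if_false]
      by_cases hv : nht_VALID.contains s = true
      · simp only [hv, if_true]
      · simp only [hv, Bool.false_eq_true, if_false]
        have hbest :
            PySem.List.min?
              (nht_KEYWORD_PRIORITY.filterMap (fun kp => if PySem.Str.isIn kp.1 (PySem.Str.lower s) then some kp.2 else none))
              (fun x => x) = nht_best nht_groups 0 (PySem.Str.lower s) := by
          unfold nht_best; rw [nht_flat_eq]
        rw [hbest]
        simp only [nht_groups, nht_best_cons]
        split_ifs <;> rfl
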